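-- pv_equiv track=rewrite | github.com/mufashe/finalProject | artifacts/views.py | _detect_year_and_subject
-- ===== SOURCE A (Python) =====
-- from typing import Any, Dict, List, Optional
-- from typing import Any, Dict, List, Optional, Tuple
--
-- YEAR_TAGS = ("S4", "S5", "S6")
--
-- def _detect_year_and_subject(feat: str) -> Tuple[Optional[str], Optional[str]]:
--     """
--     Return (year_tag, subject_name) for features like:
--       'S4_Mathematics', 'Mathematics_S4', 'S5-Physics', 'English S6'
--     If not a subject score, returns (None, None).
--     """
--     f = feat.replace("-", "_").replace(" ", "_")
--     up = f.upper()
--     # prefix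
--     for y in YEAR_TAGS:
--         if up.startswith(y + "_"):
--             subj = f[len(y) + 1:]
--             return y, subj
--     # suffix
--     for y in YEAR_TAGS:
--         if up.endswith("_" + y):
--             subj = f[:-(len(y) + 1)]
--             return y, subj
--     return None, None
-- ===== SOURCE B (Python) =====
-- def _norm(s):
--     return "".join("_" if c in "- " else c for c in s)
--
-- def _detect_year_and_subject(feat):
--     """
--     Boundary-character decomposition: instead of normalizing the whole string
--     and scanning YEAR_TAGS for prefix/suffix matches, inspect the three
--     boundary characters directly ('S'/'s', a year digit, a separator).
--     """
--     if len(feat) >= 3 and feat[0] in "Ss" and feat[1] in "456" and feat[2] in "-_ ":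
--         return "S" + feat[1], _norm(feat[3:])
--     if len(feat) >= 3 and feat[-3] in "-_ " and feat[-2] in "Ss" and feat[-1] in "456":
--         return "S" + feat[-1], _norm(feat[:-3])
--     return None, None
-- ===== Notes on version B (the rewrite author's own statement) =====
-- stated objective: alternative
-- what changed: Instead of normalizing the whole string ('-'/' '->'_'), uppercasing it, and scanning the YEAR_TAGS tuple twice for prefix and suffix matches, B inspects the three boundary characters directly (an 'S'/'s', a year digit 4-6, a separator) at either end and only normalizes the extracted subject.
import Mathlib
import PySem

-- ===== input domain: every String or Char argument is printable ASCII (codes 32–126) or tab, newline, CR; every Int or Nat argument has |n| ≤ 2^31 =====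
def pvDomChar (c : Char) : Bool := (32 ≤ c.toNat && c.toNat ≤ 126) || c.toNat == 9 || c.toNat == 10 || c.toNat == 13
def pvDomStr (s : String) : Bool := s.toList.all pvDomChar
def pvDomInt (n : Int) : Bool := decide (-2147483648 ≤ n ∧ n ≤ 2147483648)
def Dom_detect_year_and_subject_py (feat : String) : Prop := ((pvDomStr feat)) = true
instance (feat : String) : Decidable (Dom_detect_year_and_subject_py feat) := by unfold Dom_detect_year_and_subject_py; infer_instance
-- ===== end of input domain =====

-- B replaces A's normalize-whole-string + YEAR_TAGS prefix/suffix scans by direct inspection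
-- of the three boundary characters (alternative decomposition, same cost).

-- ===== PORT A =====
-- A's YEAR_TAGS tuple
def pvYearTags : List (List Char) := [['S','4'], ['S','5'], ['S','6']]

-- A's first for-loop: first tag y with up.startswith(y + "_"), subject f[len(y)+1:]
def pvFirstPrefix (up f : List Char) : List (List Char) → Option (List Char × List Char)
  | [] => none
  | y :: ys =>
    if PySem.Chars.startswith up (y ++ ['_']) then some (y, f.drop (y.length + 1))
    else pvFirstPrefix up f ys

-- A's second for-loop: first tag y with up.endswith("_" + y), subject f[:-(len(y)+1)]
def pvFirstSuffix (up f : List Char) : List (List Char) → Option (List Char × List Char)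
  | [] => none
  | y :: ys =>
    if PySem.Chars.endswith up ('_' :: y) then
      some (y, PySem.Chars.slice f none (some (-((y.length : Int) + 1))))
    else pvFirstSuffix up f ys

-- A's body after f has been computed
def pvDetectA (f : List Char) : Option String × Option String :=
  match pvFirstPrefix (PySem.Chars.upper f) f pvYearTags with
  | some (y, subj) => (some (String.mk y), some (String.mk subj))
  | none =>
    match pvFirstSuffix (PySem.Chars.upper f) f pvYearTags with
    | some (y, subj) => (some (String.mk y), some (String.mk subj))
    | none => (none, none)

def detect_year_and_subject_py (feat : String) : Option String × Option String :=
  pvDetectA (PySem.Chars.replace (PySem.Chars.replace feat.toList ['-'] ['_']) [' '] ['_'])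

-- ===== PORT B =====
-- Source B's _norm: per-character comprehension replacing '-' and ' ' by '_'
def pvNormChar (c : Char) : Char := if c = '-' ∨ c = ' ' then '_' else c
def pvNorm (cs : List Char) : List Char := cs.map pvNormChar

-- Python's `feat[i] in "..."` (the index is guarded by the length test, so the
-- `none` branch is unreachable there)
def pvCharIn (o : Option Char) (s : List Char) : Bool :=
  match o with
  | some c => s.contains c
  | none => false

def pvDetectB (cs : List Char) : Option String × Option String :=
  if decide (3 ≤ cs.length) && pvCharIn (PySem.List.pyGet? cs 0) ['S', 's']
      && pvCharIn (PySem.List.pyGet? cs 1) ['4', '5', '6']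
      && pvCharIn (PySem.List.pyGet? cs 2) ['-', '_', ' '] then
    (some (String.mk ['S', (PySem.List.pyGet? cs 1).getD 'S']),
     some (String.mk (pvNorm (PySem.List.slice cs (some 3) none))))
  else if decide (3 ≤ cs.length) && pvCharIn (PySem.List.pyGet? cs (-3)) ['-', '_', ' ']
      && pvCharIn (PySem.List.pyGet? cs (-2)) ['S', 's']
      && pvCharIn (PySem.List.pyGet? cs (-1)) ['4', '5', '6'] then
    (some (String.mk ['S', (PySem.List.pyGet? cs (-1)).getD 'S']),
     some (String.mk (pvNorm (PySem.List.slice cs none (some (-3))))))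
  else (none, none)

def detect_year_and_subject_py_alt (feat : String) : Option String × Option String :=
  pvDetectB feat.toList

-- ===== PRECONDITION & SPEC =====
def Spec_detect_year_and_subject_py (feat : String) (out : Option String × Option String) : Prop := out = detect_year_and_subject_py_alt feat
instance (feat : String) (out : Option String × Option String) : Decidable (Spec_detect_year_and_subject_py feat out) := by unfold Spec_detect_year_and_subject_py; infer_instance

-- ===== CLAIM (what is proved, stated in full; the proofs are below) =====
def Claim_equal_detect_year_and_subject_py : Prop := ∀ (feat : String), Dom_detect_year_and_subject_py feat → Spec_detect_year_and_subject_py feat (detect_year_and_subject_py feat)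

-- ===== LEMMAS AND PROOFS =====

lemma pvCharEq (c d : Char) : c = d ↔ c.toNat = d.toNat := eq_iff_eq_of_cmp_eq_cmp rfl
lemma pvCharLe (c d : Char) : c ≤ d ↔ c.toNat ≤ d.toNat := ge_iff_le

lemma pvUpper_eq (c d : Char) (hd : d.toNat < 97 ∨ 122 < d.toNat) (hv : d.toNat < 55296) :
    PySem.Chars.upperChar c = d ↔ (c = d ∨ (97 ≤ c.toNat ∧ c.toNat ≤ 122 ∧ c.toNat - 32 = d.toNat)) := by
  unfold PySem.Chars.upperChar PySem.Chars.islower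
  have ha : ('a').toNat = 97 := rfl
  have hz : ('z').toNat = 122 := rfl
  split
  · rename_i h
    simp only [Bool.and_eq_true, decide_eq_true_eq, pvCharLe, ha, hz] at h
    rw [pvCharEq, Char.toNat_ofNat, if_pos (Or.inl (by omega)), pvCharEq]
    omega
  · rename_i h
    simp only [Bool.and_eq_true, decide_eq_true_eq, pvCharLe, ha, hz, not_and_or, not_le] at h
    rw [pvCharEq]
    omega

lemma pvU_S (c : Char) :
    PySem.Chars.upperChar (pvNormChar c) = 'S' ↔ c = 'S' ∨ c = 's' := by
  unfold pvNormChar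
  by_cases h : c = '-' ∨ c = ' '
  · rw [if_pos h]
    rcases h with rfl | rfl <;> decide
  · rw [if_neg h]
    rw [pvUpper_eq c 'S' (by decide) (by decide)]
    simp only [pvCharEq]
    have hS : ('S').toNat = 83 := rfl
    have hs : ('s').toNat = 115 := rfl
    omega

lemma pvU_digit (c d : Char) (hd : d = '4' ∨ d = '5' ∨ d = '6') :
    PySem.Chars.upperChar (pvNormChar c) = d ↔ c = d := by
  unfold pvNormChar
  by_cases h : c = '-' ∨ c = ' '
  · rw [if_pos h]
    rcases h with rfl | rfl <;> rcases hd with rfl | rfl | rfl <;> decide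
  · rw [if_neg h]
    have h4 : ('4').toNat = 52 := rfl
    have h5 : ('5').toNat = 53 := rfl
    have h6 : ('6').toNat = 54 := rfl
    rcases hd with rfl | rfl | rfl <;>
      (rw [pvUpper_eq _ _ (by decide) (by decide)]; simp only [pvCharEq]; omega)

lemma pvU_us (c : Char) :
    PySem.Chars.upperChar (pvNormChar c) = '_' ↔ c = '-' ∨ c = ' ' ∨ c = '_' := by
  unfold pvNormChar
  by_cases h : c = '-' ∨ c = ' '
  · rw [if_pos h]
    rcases h with rfl | rfl <;> decide
  · rw [if_neg h]
    rw [pvUpper_eq c '_' (by decide) (by decide)]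
    simp only [pvCharEq]
    have hu : ('_').toNat = 95 := rfl
    have hm : ('-').toNat = 45 := rfl
    have hsp : (' ').toNat = 32 := rfl
    have h' : ¬ (c.toNat = 45 ∨ c.toNat = 32) := by
      simpa only [pvCharEq, hm, hsp] using h
    omega

-- single-character str.replace is a character map
lemma pvReplaceGo_single (a b : Char) :
    ∀ (l : List Char) (fuel : Nat) (acc : List Char), l.length ≤ fuel →
    PySem.Chars.replace.go [a] [b] fuel l acc
      = acc.reverse ++ l.map (fun c => if c = a then b else c) := by
  intro l
  induction l with
  | nil => intro fuel acc _; cases fuel <;> simp [PySem.Chars.replace.go]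
  | cons c t ih =>
    intro fuel acc hf
    cases fuel with
    | zero => simp at hf
    | succ f =>
      rw [PySem.Chars.replace.go]
      by_cases hc : c = a
      · subst hc
        rw [if_pos (by simp [List.isPrefixOf])]
        simp only [List.length_cons, List.length_nil, List.drop_succ_cons, List.drop_zero]
        rw [ih f _ (by simpa using hf)]
        simp
      · rw [if_neg (by simp [List.isPrefixOf]; exact fun h => absurd h.symm hc)]
        rw [ih f _ (by simpa using hf)]
        simp [hc]

lemma pvReplace_single (s : List Char) (a b : Char) :
    PySem.Chars.replace s [a] [b] = s.map (fun c => if c = a then b else c) := by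
  unfold PySem.Chars.replace
  rw [if_neg (by simp)]
  rw [pvReplaceGo_single a b s s.length [] le_rfl]
  simp

-- A's two replaces compose into Source B's per-character _norm
lemma pvNormA (cs : List Char) :
    PySem.Chars.replace (PySem.Chars.replace cs ['-'] ['_']) [' '] ['_'] = cs.map pvNormChar := by
  rw [pvReplace_single, pvReplace_single, List.map_map]
  apply List.map_congr_left
  intro c _
  unfold pvNormChar
  by_cases h1 : c = '-'
  · subst h1; simp
  · by_cases h2 : c = ' ' <;> simp [h1, h2, Function.comp]

lemma pvU_S' (c : Char) : ('S' = PySem.Chars.upperChar (pvNormChar c)) ↔ c = 'S' ∨ c = 's' := by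
  rw [eq_comm]; exact pvU_S c
lemma pvU_digit' (c d : Char) (hd : d = '4' ∨ d = '5' ∨ d = '6') :
    (d = PySem.Chars.upperChar (pvNormChar c)) ↔ c = d := by
  rw [eq_comm]; exact pvU_digit c d hd
lemma pvU_us' (c : Char) : ('_' = PySem.Chars.upperChar (pvNormChar c)) ↔ (c = '-' ∨ c = ' ' ∨ c = '_') := by
  rw [eq_comm]; exact pvU_us c


lemma pvPrefix_val (c0 c1 c2 : Char) (t : List Char) :
    pvFirstPrefix (PySem.Chars.upper ((c0::c1::c2::t).map pvNormChar)) ((c0::c1::c2::t).map pvNormChar) pvYearTags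
    = if (c0 = 'S' ∨ c0 = 's') ∧ (c1 = '4' ∨ c1 = '5' ∨ c1 = '6') ∧ (c2 = '-' ∨ c2 = ' ' ∨ c2 = '_') then
        some (['S', c1], t.map pvNormChar)
      else none := by
  have e4 := pvU_digit' c1 '4' (by tauto)
  have e5 := pvU_digit' c1 '5' (by tauto)
  have e6 := pvU_digit' c1 '6' (by tauto)
  simp only [pvYearTags, pvFirstPrefix]
  simp [PySem.Chars.startswith, PySem.Chars.upper, List.isPrefixOf, pvU_S', pvU_us', e4, e5, e6]
  split_ifs <;> simp_all

lemma pvSuffix_val (cs : List Char) (d0 d1 d2 : Char) (r : List Char)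
    (hrev : cs.reverse = d0::d1::d2::r) :
    pvFirstSuffix (PySem.Chars.upper (cs.map pvNormChar)) (cs.map pvNormChar) pvYearTags
    = if (d2 = '-' ∨ d2 = ' ' ∨ d2 = '_') ∧ (d1 = 'S' ∨ d1 = 's') ∧ (d0 = '4' ∨ d0 = '5' ∨ d0 = '6') then
        some (['S', d0], (cs.take (cs.length - 3)).map pvNormChar)
      else none := by
  have e4 := pvU_digit' d0 '4' (by tauto)
  have e5 := pvU_digit' d0 '5' (by tauto)
  have e6 := pvU_digit' d0 '6' (by tauto)
  simp only [pvYearTags, pvFirstSuffix]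
  simp [PySem.Chars.endswith, PySem.Chars.upper, List.isSuffixOf, ← List.map_reverse, hrev,
        List.cons_prefix_cons, pvU_S', pvU_us', e4, e5, e6,
        PySem.List.slice_to_neg_ofNat, List.map_take]
  split_ifs <;> simp_all

lemma pvA_char (c0 c1 c2 : Char) (t : List Char) (d0 d1 d2 : Char) (r : List Char)
    (hrev : (c0::c1::c2::t).reverse = d0::d1::d2::r) :
    pvDetectA ((c0::c1::c2::t).map pvNormChar)
    = if (c0 = 'S' ∨ c0 = 's') ∧ (c1 = '4' ∨ c1 = '5' ∨ c1 = '6') ∧ (c2 = '-' ∨ c2 = ' ' ∨ c2 = '_') then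
        (some (String.mk ['S', c1]), some (String.mk (t.map pvNormChar)))
      else if (d2 = '-' ∨ d2 = ' ' ∨ d2 = '_') ∧ (d1 = 'S' ∨ d1 = 's') ∧ (d0 = '4' ∨ d0 = '5' ∨ d0 = '6') then
        (some (String.mk ['S', d0]),
         some (String.mk (((c0::c1::c2::t).take ((c0::c1::c2::t).length - 3)).map pvNormChar)))
      else (none, none) := by
  by_cases hp : (c0 = 'S' ∨ c0 = 's') ∧ (c1 = '4' ∨ c1 = '5' ∨ c1 = '6') ∧ (c2 = '-' ∨ c2 = ' ' ∨ c2 = '_')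
  · unfold pvDetectA
    rw [pvPrefix_val, if_pos hp, if_pos hp]
  · unfold pvDetectA
    rw [pvPrefix_val, if_neg hp, if_neg hp]
    by_cases hq : (d2 = '-' ∨ d2 = ' ' ∨ d2 = '_') ∧ (d1 = 'S' ∨ d1 = 's') ∧ (d0 = '4' ∨ d0 = '5' ∨ d0 = '6')
    · rw [pvSuffix_val _ _ _ _ _ hrev, if_pos hq, if_pos hq]
    · rw [pvSuffix_val _ _ _ _ _ hrev, if_neg hq, if_neg hq]

set_option maxHeartbeats 1000000 in
lemma pvB_char (c0 c1 c2 : Char) (t : List Char) (d0 d1 d2 : Char) (r : List Char)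
    (hrev : (c0::c1::c2::t).reverse = d0::d1::d2::r) :
    pvDetectB (c0::c1::c2::t)
    = if (c0 = 'S' ∨ c0 = 's') ∧ (c1 = '4' ∨ c1 = '5' ∨ c1 = '6') ∧ (c2 = '-' ∨ c2 = ' ' ∨ c2 = '_') then
        (some (String.mk ['S', c1]), some (String.mk (t.map pvNormChar)))
      else if (d2 = '-' ∨ d2 = ' ' ∨ d2 = '_') ∧ (d1 = 'S' ∨ d1 = 's') ∧ (d0 = '4' ∨ d0 = '5' ∨ d0 = '6') then
        (some (String.mk ['S', d0]),
         some (String.mk (((c0::c1::c2::t).take ((c0::c1::c2::t).length - 3)).map pvNormChar)))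
      else (none, none) := by
  have hn : 3 ≤ (c0::c1::c2::t).length := by simp
  have g1 : PySem.List.pyGet? (c0::c1::c2::t) 1 = some c1 := by
    rw [PySem.List.pyGet?_ofNat']; rfl
  have g2 : PySem.List.pyGet? (c0::c1::c2::t) 2 = some c2 := by
    rw [PySem.List.pyGet?_ofNat']; rfl
  have hr2 : (2:Nat) ≤ (c0::c1::c2::t).length := by simp
  have gm1 : PySem.List.pyGet? (c0::c1::c2::t) (-1) = some d0 := by
    rw [PySem.List.pyGet?_neg_one, List.getLast?_eq_head?_reverse, hrev]; rfl
  have gm2 : PySem.List.pyGet? (c0::c1::c2::t) (-2) = some d1 := by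
    rw [PySem.List.pyGet?_neg_ofNat _ 2 (by norm_num) hr2]
    have h1 : (1:Nat) < (c0::c1::c2::t).length := by simp
    have := List.getElem?_reverse h1
    rw [hrev] at this
    simpa using this.symm
  have gm3 : PySem.List.pyGet? (c0::c1::c2::t) (-3) = some d2 := by
    rw [PySem.List.pyGet?_neg_ofNat _ 3 (by norm_num) hn]
    have h2 : (2:Nat) < (c0::c1::c2::t).length := by simp
    have := List.getElem?_reverse h2
    rw [hrev] at this
    simpa using this.symm
  have hsl : PySem.List.slice (c0::c1::c2::t) (some 3) = t := by
    rw [PySem.List.slice_from _ (by norm_num : (0:Int) ≤ 3)]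
    simp
  simp [pvDetectB, pvCharIn, pvNorm, g1, g2, gm1, gm2, gm3, hsl,
        PySem.List.slice_to_neg_ofNat _ 3 (by norm_num), List.map_take]
  have e1 : (((c0 = 'S' ∨ c0 = 's') ∧ (c1 = '4' ∨ c1 = '5' ∨ c1 = '6')) ∧ (c2 = '-' ∨ c2 = '_' ∨ c2 = ' ')) ↔ ((c0 = 'S' ∨ c0 = 's') ∧ (c1 = '4' ∨ c1 = '5' ∨ c1 = '6') ∧ (c2 = '-' ∨ c2 = ' ' ∨ c2 = '_')) := by
    rw [and_assoc, or_comm (a := c2 = '_') (b := c2 = ' ')]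
  have e2 : (((d2 = '-' ∨ d2 = '_' ∨ d2 = ' ') ∧ (d1 = 'S' ∨ d1 = 's')) ∧ (d0 = '4' ∨ d0 = '5' ∨ d0 = '6')) ↔ ((d2 = '-' ∨ d2 = ' ' ∨ d2 = '_') ∧ (d1 = 'S' ∨ d1 = 's') ∧ (d0 = '4' ∨ d0 = '5' ∨ d0 = '6')) := by
    rw [and_assoc, or_comm (a := d2 = '_') (b := d2 = ' ')]
  simp only [e1, e2]

lemma pvStarts_false {s p : List Char} (h : s.length < p.length) :
    PySem.Chars.startswith s p = false := by
  rw [Bool.eq_false_iff]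
  intro hc
  have := ((PySem.Chars.startswith_iff s p).1 hc).length_le
  omega

lemma pvEnds_false {s p : List Char} (h : s.length < p.length) :
    PySem.Chars.endswith s p = false := by
  rw [Bool.eq_false_iff]
  intro hc
  have := ((PySem.Chars.endswith_iff s p).1 hc).length_le
  omega

theorem pvMain (cs : List Char) : pvDetectA (cs.map pvNormChar) = pvDetectB cs := by
  by_cases hn : 3 ≤ cs.length
  · obtain ⟨c0, c1, c2, t, rfl⟩ : ∃ c0 c1 c2 t, cs = c0 :: c1 :: c2 :: t := by
      rcases cs with _ | ⟨c0, _ | ⟨c1, _ | ⟨c2, t⟩⟩⟩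
      · exact absurd hn (by simp)
      · exact absurd hn (by simp)
      · exact absurd hn (by simp)
      · exact ⟨c0, c1, c2, t, rfl⟩
    obtain ⟨d0, d1, d2, r, hrev⟩ :
        ∃ d0 d1 d2 r, (c0 :: c1 :: c2 :: t).reverse = d0 :: d1 :: d2 :: r := by
      rcases h : (c0 :: c1 :: c2 :: t).reverse with _ | ⟨d0, _ | ⟨d1, _ | ⟨d2, r⟩⟩⟩
      · have hl := congrArg List.length h
        simp only [List.length_reverse, List.length_cons, List.length_nil] at hl
        omega
      · have hl := congrArg List.length h
        simp only [List.length_reverse, List.length_cons, List.length_nil] at hl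
        omega
      · have hl := congrArg List.length h
        simp only [List.length_reverse, List.length_cons, List.length_nil] at hl
        omega
      · exact ⟨d0, d1, d2, r, rfl⟩
    rw [pvA_char c0 c1 c2 t d0 d1 d2 r hrev, pvB_char c0 c1 c2 t d0 d1 d2 r hrev]
  · have hs : ∀ p : List Char, p.length = 3 →
        PySem.Chars.startswith (PySem.Chars.upper (cs.map pvNormChar)) p = false := by
      intro p hp
      apply pvStarts_false
      simp [PySem.Chars.upper, hp]
      omega
    have he : ∀ p : List Char, p.length = 3 →
        PySem.Chars.endswith (PySem.Chars.upper (cs.map pvNormChar)) p = false := by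
      intro p hp
      apply pvEnds_false
      simp [PySem.Chars.upper, hp]
      omega
    simp [pvDetectA, pvFirstPrefix, pvFirstSuffix, pvYearTags, pvDetectB, hn,
          hs ['S','4','_'] rfl, hs ['S','5','_'] rfl, hs ['S','6','_'] rfl,
          he ['_','S','4'] rfl, he ['_','S','5'] rfl, he ['_','S','6'] rfl]

-- ===== VERDICT (by name: the statement is the Claim_ definition above) =====
theorem detect_year_and_subject_py_spec : Claim_equal_detect_year_and_subject_py := by
  intro feat _
  unfold Spec_detect_year_and_subject_py detect_year_and_subject_py detect_year_and_subject_py_alt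
  rw [pvNormA, pvMain]
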